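-- pv_equiv track=rewrite | github.com/daniel-reich/ubiquitous-fiesta | hv572GaPtbqwhJpTb_22.py | elasticize
-- ===== SOURCE A (Python) =====
-- def elasticize(word):
--     lw=len(word)
--     p=lw//2
--     r=m=''
--     if lw%2!=0:
--         m=word[p]
--         word=word[:p]+word[p+1:]
--         lw-=1
--     k=-2*p-1
--     for i in range(lw):
--         k+=2
--         r+=word[i]*((i+1)-(i>p-1)*k)
--     if m!='':
--         r=r[:len(r)//2]+m*(p+1)+r[len(r)//2:]
--     return r
-- ===== SOURCE B (Python) =====
-- def elasticize(word):
--     n = len(word)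
--     return ''.join(c * min(i + 1, n - i) for i, c in enumerate(word))
-- ===== Notes on version B (the rewrite author's own statement) =====
-- stated objective: simpler
-- what changed: B replaces A's odd/even split, middle-character extraction/reinsertion and running offset k by one uniform pass that repeats word[i] exactly min(i+1, n-i) times and joins the pieces.
import Mathlib
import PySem

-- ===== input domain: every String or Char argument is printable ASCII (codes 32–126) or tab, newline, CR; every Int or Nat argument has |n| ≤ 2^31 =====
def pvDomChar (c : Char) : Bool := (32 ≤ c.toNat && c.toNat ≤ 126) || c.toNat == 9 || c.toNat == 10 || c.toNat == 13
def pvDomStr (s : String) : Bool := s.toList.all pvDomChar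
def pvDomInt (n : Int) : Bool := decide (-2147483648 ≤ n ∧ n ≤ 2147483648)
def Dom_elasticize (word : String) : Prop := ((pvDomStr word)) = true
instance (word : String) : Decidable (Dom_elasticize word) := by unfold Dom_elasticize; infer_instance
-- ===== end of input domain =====

-- B replaces A's odd/even split, middle-char extraction/reinsertion and running offset by one
-- uniform pass repeating word[i] exactly min(i+1, n-i) times (objective: simpler).

-- ===== PORT A =====
-- the body of A's 'for i in range(lw)' loop: k += 2; r += word[i]*((i+1)-(i>p-1)*k)
def elastLoop (w : List Char) (p : Int) (s : Int × List Char) (i : Int) : Int × List Char :=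
  let k := s.1 + 2
  (k, s.2 ++ PySem.List.pyRepeat ((PySem.List.pyGet? w i).elim [] (fun c => [c]))
        ((i + 1) - (if i > p - 1 then 1 else 0) * k))

def elasticize (word : String) : String :=
  let cs := word.toList
  let lw : Int := (cs.length : Int)
  let p : Int := PySem.Int.floordiv lw 2
  -- (m, word, lw) after the odd-length branch
  let t : List Char × List Char × Int :=
    if PySem.Int.mod lw 2 ≠ 0 then
      ((PySem.List.pyGet? cs p).elim [] (fun c => [c]),
       PySem.List.slice cs none (some p) ++ PySem.List.slice cs (some (p + 1)) none,
       lw - 1)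
    else ([], cs, lw)
  let r := ((PySem.List.pyRange 0 t.2.2).foldl (elastLoop t.2.1 p) (-2 * p - 1, [])).2
  if t.1 ≠ [] then
    String.mk (PySem.List.slice r none (some (PySem.Int.floordiv (r.length : Int) 2)) ++
               PySem.List.pyRepeat t.1 (p + 1) ++
               PySem.List.slice r (some (PySem.Int.floordiv (r.length : Int) 2)) none)
  else
    String.mk r

-- ===== PORT B =====
def elasticize_alt (word : String) : String :=
  let cs := word.toList
  let n := cs.length
  String.mk ((PySem.List.enumerate cs).flatMap
    (fun ic => List.replicate (min (ic.1.toNat + 1) (n - ic.1.toNat)) ic.2))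

-- ===== PRECONDITION & SPEC =====
def Spec_elasticize (word : String) (out : String) : Prop := out = elasticize_alt word
instance (word : String) (out : String) : Decidable (Spec_elasticize word out) := by unfold Spec_elasticize; infer_instance

-- ===== CLAIM (what is proved, stated in full; the proofs are below) =====
def Claim_equal_elasticize : Prop := ∀ (word : String), Dom_elasticize word → Spec_elasticize word (elasticize word)

-- ===== LEMMAS AND PROOFS =====

-- the 'pyramid' shape: character i repeated min(i+1, n-i) times
def pyrF (cs : List Char) (n i : Nat) : List Char :=
  (cs[i]?).elim [] (fun c => List.replicate (min (i + 1) (n - i)) c)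

def pyr (cs : List Char) : List Char := (List.range cs.length).flatMap (pyrF cs cs.length)

-- the chunk A's loop appends at (0-based) iteration i, when the loop started with k = k0
def aChunk (w : List Char) (p k0 : Int) (i : Nat) : List Char :=
  PySem.List.pyRepeat ((PySem.List.pyGet? w ((i : Int))).elim [] (fun c => [c]))
    (((i : Int) + 1) - (if (i : Int) > p - 1 then 1 else 0) * (k0 + 2 * ((i : Int) + 1)))

-- B's port builds exactly the pyramid
lemma alt_eq_pyr (word : String) : elasticize_alt word = String.mk (pyr word.toList) := by
  simp only [elasticize_alt, pyr]
  congr 1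
  rw [PySem.List.enumerate_eq_map_pyRange word.toList default, List.flatMap_map,
      PySem.List.len, PySem.List.pyRange_zero_natCast, List.flatMap_map]
  apply List.flatMap_congr
  intro i hi
  rw [List.mem_range] at hi
  simp only [PySem.List.pyGetD_natCast, Int.toNat_natCast, pyrF]
  rw [List.getD_eq_getElem?_getD, List.getElem?_eq_getElem hi]
  rfl

-- A's loop, unrolled: the fold over range(L) appends chunk i with k = k0 + 2*(i+1)
lemma fold_spec (w : List Char) (p : Int) :
    ∀ (L : Nat) (k0 : Int) (r0 : List Char),
      (PySem.List.pyRange 0 (L : Int)).foldl (elastLoop w p) (k0, r0)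
      = (k0 + 2 * L, r0 ++ (List.range L).flatMap (aChunk w p k0)) := by
  intro L
  induction L with
  | zero => intro k0 r0; simp [PySem.List.pyRange]
  | succ L ih =>
      intro k0 r0
      have h : ((L : Int) + 1) = ((L + 1 : Nat) : Int) := by push_cast; ring
      rw [← h, PySem.List.pyRange_one_succ_right (by positivity), List.foldl_append, ih,
          List.range_succ, List.flatMap_append]
      simp only [List.foldl_cons, List.foldl_nil, elastLoop, aChunk, List.flatMap_cons,
        List.flatMap_nil, List.append_nil, List.append_assoc, Prod.mk.injEq]
      refine ⟨by ring, ?_⟩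
      have harith : k0 + 2 * (L : Int) + 2 = k0 + 2 * ((L : Int) + 1) := by ring
      rw [harith]

-- on a word of even length 2*q (with p = q, k0 = -2q-1) A's loop builds the pyramid of w
lemma loop_eq_pyr (w : List Char) (q : Nat) (hw : w.length = 2 * q) :
    ((PySem.List.pyRange 0 ((2 * q : Nat) : Int)).foldl (elastLoop w (q : Int)) (-2 * q - 1, [])).2
      = pyr w := by
  rw [fold_spec]
  simp only [List.nil_append, pyr, hw]
  apply List.flatMap_congr
  intro i hi
  rw [List.mem_range] at hi
  have hiw : i < w.length := by omega
  unfold aChunk pyrF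
  rw [PySem.List.pyGet?_natCast, List.getElem?_eq_getElem hiw]
  simp only [Option.elim, PySem.List.pyRepeat_singleton]
  congr 1
  by_cases hcase : q ≤ i
  · have hgt : (i : Int) > (q : Int) - 1 := by omega
    rw [if_pos hgt]
    omega
  · have hgt : ¬ ((i : Int) > (q : Int) - 1) := by omega
    rw [if_neg hgt]
    omega

-- lengths of the two halves of an even pyramid agree
lemma halves_len (q : Nat) :
    ((List.range q).map (fun i => i + 1)).sum = ((List.range q).map (fun j => q - j)).sum := by
  induction q with
  | zero => rfl
  | succ q ih =>
      conv_rhs => rw [List.range_succ_eq_map]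
      rw [List.range_succ, List.map_append, List.sum_append]
      simp only [List.map_cons, List.sum_cons, List.map_map, Function.comp_def,
        Nat.succ_eq_add_one]
      have h : ((List.range q).map (fun j => q + 1 - (j + 1))) =
             (List.range q).map (fun j => q - j) := by
        apply List.map_congr_left; intro a _; omega
      rw [h, ← ih]
      simp
      omega

-- an even pyramid splits into two equal-length halves
lemma pyr_even_split (w : List Char) (q : Nat) (hw : w.length = 2 * q) :
    pyr w = (List.range q).flatMap (pyrF w (2 * q)) ++
            (List.range q).flatMap (fun j => pyrF w (2 * q) (q + j)) ∧
    ((List.range q).flatMap (pyrF w (2 * q))).length =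
    ((List.range q).flatMap (fun j => pyrF w (2 * q) (q + j))).length := by
  constructor
  · unfold pyr
    rw [hw, two_mul, List.range_add, List.flatMap_append, List.flatMap_map]
  · rw [List.length_flatMap, List.length_flatMap]
    have h1 : ((List.range q).map (fun i => (pyrF w (2 * q) i).length)) =
              (List.range q).map (fun i => i + 1) := by
      apply List.map_congr_left; intro i hi
      rw [List.mem_range] at hi
      have hlt : i < w.length := by omega
      simp only [pyrF, List.getElem?_eq_getElem hlt, Option.elim, List.length_replicate]
      omega
    have h2 : ((List.range q).map (fun j => (pyrF w (2 * q) (q + j)).length)) =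
              (List.range q).map (fun j => q - j) := by
      apply List.map_congr_left; intro j hj
      rw [List.mem_range] at hj
      have hlt : q + j < w.length := by omega
      simp only [pyrF, List.getElem?_eq_getElem hlt, Option.elim, List.length_replicate]
      omega
    rw [h1, h2, halves_len]

-- splicing q+1 copies of cs[q] into the middle of the pyramid of cs-without-cs[q]
-- gives the pyramid of cs (odd length 2q+1)
lemma pyr_odd_splice (cs : List Char) (q : Nat) (hn : cs.length = 2 * q + 1) :
    pyr cs = ((List.range q).flatMap (pyrF (cs.take q ++ cs.drop (q + 1)) (2 * q))) ++
             List.replicate (q + 1) (cs.getD q default) ++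
             ((List.range q).flatMap (fun j => pyrF (cs.take q ++ cs.drop (q + 1)) (2 * q) (q + j))) := by
  have hq : q < cs.length := by omega
  have htl : (cs.take q).length = q := by rw [List.length_take]; omega
  unfold pyr
  rw [hn]
  have hsplit : 2 * q + 1 = (q + 1) + q := by omega
  rw [hsplit, List.range_add, List.flatMap_append, List.flatMap_map, List.range_succ,
      List.flatMap_append]
  congr 1
  · congr 1
    · -- first halves agree
      apply List.flatMap_congr
      intro i hi
      rw [List.mem_range] at hi
      have hi' : i < cs.length := by omega
      simp only [pyrF]
      rw [List.getElem?_append_left (by omega), List.getElem?_take, if_pos hi,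
          List.getElem?_eq_getElem hi']
      simp only [Option.elim]
      congr 1
      omega
    · -- the middle chunk
      simp only [List.flatMap_cons, List.flatMap_nil, List.append_nil, pyrF,
        List.getElem?_eq_getElem hq, Option.elim, List.getD_eq_getElem?_getD, Option.getD_some]
      congr 1
      omega
  · -- second halves agree
    apply List.flatMap_congr
    intro j hj
    rw [List.mem_range] at hj
    have hj' : q + 1 + j < cs.length := by omega
    simp only [pyrF]
    rw [List.getElem?_append_right (by omega), htl, List.getElem?_drop]
    have hidx : q + 1 + (q + j - q) = q + 1 + j := by omega
    rw [hidx, List.getElem?_eq_getElem hj']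
    simp only [Option.elim]
    congr 1
    omega

-- A builds the pyramid of its input
lemma a_eq_pyr (word : String) : elasticize word = String.mk (pyr word.toList) := by
  simp only [elasticize]
  set cs := word.toList with hcs
  by_cases hpar : PySem.Int.mod (cs.length : Int) 2 ≠ 0
  · -- odd length
    have hm2 : PySem.Int.mod ((cs.length : Int)) 2 = ((cs.length % 2 : Nat) : Int) :=
      by exact_mod_cast PySem.Int.mod_natCast cs.length 2
    have hodd : cs.length % 2 = 1 := by
      rw [hm2] at hpar; omega
    obtain ⟨q, hq⟩ : ∃ q, cs.length = 2 * q + 1 := ⟨cs.length / 2, by omega⟩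
    have hp : PySem.Int.floordiv (cs.length : Int) 2 = (q : Int) := by
      have h := PySem.Int.floordiv_natCast cs.length 2
      have h2 : (cs.length / 2 : Nat) = q := by omega
      rw [h2] at h
      exact_mod_cast h
    rw [if_pos hpar, hp]
    have hget : PySem.List.pyGet? cs (q : Int) = some (cs[q]'(by omega)) := by
      rw [PySem.List.pyGet?_natCast, List.getElem?_eq_getElem]
    have hw : PySem.List.slice cs none (some (q : Int)) ++
              PySem.List.slice cs (some ((q : Int) + 1)) none = cs.take q ++ cs.drop (q + 1) := by
      rw [PySem.List.slice_to cs (by positivity)]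
      have hcast : ((q : Int) + 1) = ((q + 1 : Nat) : Int) := by push_cast; ring
      rw [hcast, PySem.List.slice_from cs (by positivity)]
      simp
    simp only [hget, Option.elim, hw]
    have hlw : (cs.length : Int) - 1 = ((2 * q : Nat) : Int) := by rw [hq]; push_cast; ring
    rw [hlw]
    set w := cs.take q ++ cs.drop (q + 1) with hwdef
    have hwlen : w.length = 2 * q := by
      rw [hwdef, List.length_append, List.length_take, List.length_drop]; omega
    have hloop := loop_eq_pyr w q hwlen
    obtain ⟨hsplit, hhalf⟩ := pyr_even_split w q hwlen
    set A1 := (List.range q).flatMap (pyrF w (2 * q)) with hA1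
    set A2 := (List.range q).flatMap (fun j => pyrF w (2 * q) (q + j)) with hA2
    have hr : ((PySem.List.pyRange 0 ((2 * q : Nat) : Int)).foldl (elastLoop w (q : Int))
        (-2 * (q : Int) - 1, [])).2 = A1 ++ A2 := by rw [hloop, hsplit]
    rw [if_pos (by simp), hr]
    have hfd : PySem.Int.floordiv (((A1 ++ A2).length : Nat) : Int) 2 = (A1.length : Int) := by
      have h := PySem.Int.floordiv_natCast (A1 ++ A2).length 2
      have h2 : ((A1 ++ A2).length / 2 : Nat) = A1.length := by
        rw [List.length_append, ← hhalf]; omega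
      rw [h2] at h
      exact_mod_cast h
    rw [hfd, PySem.List.slice_to _ (by positivity), PySem.List.slice_from _ (by positivity),
        Int.toNat_natCast, List.take_left' rfl, List.drop_left' rfl,
        PySem.List.pyRepeat_singleton]
    have htn : ((q : Int) + 1).toNat = q + 1 := by omega
    rw [htn]
    congr 1
    rw [pyr_odd_splice cs q hq, ← hwdef, ← hA1, ← hA2]
    congr 2
    rw [List.getD_eq_getElem?_getD, List.getElem?_eq_getElem (by omega : q < cs.length)]
    rfl
  · -- even length
    have hm2 : PySem.Int.mod ((cs.length : Int)) 2 = ((cs.length % 2 : Nat) : Int) :=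
      by exact_mod_cast PySem.Int.mod_natCast cs.length 2
    have heven : cs.length % 2 = 0 := by
      rw [not_not, hm2] at hpar; omega
    obtain ⟨q, hq⟩ : ∃ q, cs.length = 2 * q := ⟨cs.length / 2, by omega⟩
    have hp : PySem.Int.floordiv (cs.length : Int) 2 = (q : Int) := by
      have h := PySem.Int.floordiv_natCast cs.length 2
      have h2 : (cs.length / 2 : Nat) = q := by omega
      rw [h2] at h
      exact_mod_cast h
    rw [if_neg hpar, hp]
    rw [if_neg (by simp)]
    have hcl : (cs.length : Int) = ((2 * q : Nat) : Int) := by rw [hq]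
    rw [hcl, loop_eq_pyr cs q hq]

-- ===== VERDICT (by name: the statement is the Claim_ definition above) =====
theorem elasticize_spec : Claim_equal_elasticize := by
  intro word _
  unfold Spec_elasticize
  rw [a_eq_pyr, alt_eq_pyr]
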